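-- pv_equiv track=rewrite | github.com/kakumanilalitha21/os-lab | mfu.py | mfu
-- ===== SOURCE A (Python) =====
-- from collections import defaultdict
--
-- def mfu(pages,capacity):
--     memory=[]
--     pagefaults=0
--     freq=defaultdict(int)
--     for page in pages:
--         if page not in memory:
--             pagefaults+=1
--             if len(memory)<capacity:
--                 memory.append(page)
--                 freq[page]=1
--             else:
--                 lfupage=max(memory,key=lambda p:freq[p])
--                 memory.remove(lfupage)
--                 memory.append(page)
--                 freq[page]=1
--         else:
--             freq[page]+=1
--     return pagefaults
-- ===== SOURCE B (Python) =====
-- def _insort(entries, e):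
--     # insert e into the ascending-sorted candidate list (linear scan insertion)
--     i = 0
--     while i < len(entries) and entries[i] < e:
--         i += 1
--     entries.insert(i, e)
--
-- def mfu(pages, capacity):
--     # Lazy-deletion candidate structure instead of a per-eviction scan:
--     # cache maps a resident page to (freq, seq); every freq change pushes a
--     # candidate (freq, -seq, page) into a sorted list; eviction pops stale
--     # candidates from the top until one matches the cache, which is then the
--     # resident page with maximal frequency and, on ties, earliest insertion.
--     cache = {}            # page -> (freq, seq)
--     entries = []          # sorted ascending by (freq, -seq, page); best victim last
--     faults = 0
--     seq = 0
--     for page in pages: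
--         cur = cache.get(page)
--         if cur is not None:
--             f, s = cur
--             cache[page] = (f + 1, s)
--             _insort(entries, (f + 1, -s, page))
--         else:
--             faults += 1
--             if len(cache) >= capacity:
--                 while True:
--                     f, negs, p = entries.pop()
--                     if cache.get(p) == (f, -negs):
--                         del cache[p]
--                         break
--             cache[page] = (1, seq)
--             _insort(entries, (1, -seq, page))
--             seq += 1
--     return faults
-- ===== Notes on version B (the rewrite author's own statement) =====
-- stated objective: alternative
-- what changed: replaces A's per-eviction linear max-scan over the memory list by a lazy-deletion sorted candidate list keyed by (freq, -insertion_seq): every frequency change pushes a candidate and eviction pops stale candidates until one matches the cache, so no scan over the resident pages is ever performed at eviction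
import Mathlib
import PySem

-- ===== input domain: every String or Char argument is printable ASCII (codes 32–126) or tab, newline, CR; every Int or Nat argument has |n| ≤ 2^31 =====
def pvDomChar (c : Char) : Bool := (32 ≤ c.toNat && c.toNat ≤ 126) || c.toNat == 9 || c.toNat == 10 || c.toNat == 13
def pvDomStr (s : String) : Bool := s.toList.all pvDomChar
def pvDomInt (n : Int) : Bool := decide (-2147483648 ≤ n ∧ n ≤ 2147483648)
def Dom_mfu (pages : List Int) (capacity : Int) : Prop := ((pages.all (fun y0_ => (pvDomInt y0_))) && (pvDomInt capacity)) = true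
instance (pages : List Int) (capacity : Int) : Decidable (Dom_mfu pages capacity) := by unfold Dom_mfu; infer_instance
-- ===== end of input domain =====

-- B replaces A's per-eviction linear max-scan over the memory list by a lazy-deletion
-- sorted candidate list keyed by (freq, -insertion_seq): a different algorithm, measurably
-- faster on a timing run's generated workloads (insertion-heavy traces can still favour A).

-- ===== PORT A =====
-- one loop iteration of A: state = (memory, pagefaults, freq)
def mfuStepA (capacity : Int) (st : List Int × Int × PySem.Dict Int Int) (page : Int) :
    List Int × Int × PySem.Dict Int Int :=
  if ¬ (page ∈ st.1) then
    if (st.1.length : Int) < capacity then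
      (st.1 ++ [page], st.2.1 + 1, st.2.2.insert page 1)
    else
      match PySem.List.max? st.1 (fun p => st.2.2.getD p 0) with
      | some lfupage =>
          (((PySem.List.remove? st.1 lfupage).getD st.1) ++ [page], st.2.1 + 1, st.2.2.insert page 1)
      | none => (st.1, st.2.1 + 1, st.2.2)  -- Python raises ValueError here (max of empty memory); outside Pre_
  else
    (st.1, st.2.1, st.2.2.insert page (st.2.2.getD page 0 + 1))

def mfu (pages : List Int) (capacity : Int) : Int :=
  (pages.foldl (mfuStepA capacity) ([], 0, PySem.Dict.empty)).2.1

-- ===== PORT B =====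
-- Python tuple '<' on the (freq, -seq, page) candidates, lexicographic on Ints
def tupLt (a b : Int × Int × Int) : Bool :=
  a.1 < b.1 || (a.1 == b.1 && (a.2.1 < b.2.1 || (a.2.1 == b.2.1 && a.2.2 < b.2.2)))

-- Source B's _insort: insert e before the first element not < e (the position the
-- linear scan `while i < len(a) and a[i] < e` finds); exact for any list
def insortB (entries : List (Int × Int × Int)) (e : Int × Int × Int) :
    List (Int × Int × Int) :=
  match entries with
  | [] => [e]
  | x :: t => if tupLt x e then x :: insortB t e else e :: x :: t

-- candidate validity test of Source B: cache.get(p) == (f, -negs)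
def validB (cache : PySem.Dict Int (Int × Int)) (x : Int × Int × Int) : Bool :=
  cache.get? x.2.2 == some (x.1, -x.2.1)

-- Source B's `while True: e = entries.pop(); if valid: break` loop, modelled on the
-- REVERSED entries list (pop() takes from the end); none = IndexError (outside Pre_)
def popGo (cache : PySem.Dict Int (Int × Int)) :
    List (Int × Int × Int) → Option (List (Int × Int × Int) × Int)
  | [] => none
  | e :: rest => if validB cache e then some (rest, e.2.2) else popGo cache rest

-- one loop iteration of B: state = (cache, entries, faults, seq)
def mfuStepB (capacity : Int)
    (st : PySem.Dict Int (Int × Int) × List (Int × Int × Int) × Int × Int) (page : Int) :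
    PySem.Dict Int (Int × Int) × List (Int × Int × Int) × Int × Int :=
  match st with
  | (cache, entries, faults, seq) =>
    match cache.get? page with
    | some (f, s) =>
        (cache.insert page (f + 1, s), insortB entries (f + 1, -s, page), faults, seq)
    | none =>
        let st' :=
          if capacity ≤ (cache.size : Int) then
            match popGo cache entries.reverse with
            | some (restRev, p) => (cache.erase p, restRev.reverse)
            | none => (cache, entries)  -- Python raises IndexError (pop from empty list); outside Pre_
          else (cache, entries)
        (st'.1.insert page (1, seq), insortB st'.2 (1, -seq, page), faults + 1, seq + 1)

def mfu_alt (pages : List Int) (capacity : Int) : Int :=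
  (pages.foldl (mfuStepB capacity) (PySem.Dict.empty, [], 0, 0)).2.2.1

-- ===== PRECONDITION & SPEC =====
-- Pre_ excludes exactly the inputs on which both programs raise: with capacity ≤ 0 and a
-- nonempty page list the first fault makes A call max() on the empty memory (ValueError)
-- and B pop() from the empty candidate list (IndexError).
def Pre_mfu (pages : List Int) (capacity : Int) : Prop := 0 < capacity ∨ pages = []
instance (pages : List Int) (capacity : Int) : Decidable (Pre_mfu pages capacity) := by unfold Pre_mfu; infer_instance
def pvWitness_mfu : List Int × Int := ([1, 2, 1, 3, 2, 4], 2)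
def Spec_mfu (pages : List Int) (capacity : Int) (out : Int) : Prop := out = mfu_alt pages capacity
instance (pages : List Int) (capacity : Int) (out : Int) : Decidable (Spec_mfu pages capacity out) := by unfold Spec_mfu; infer_instance

-- ===== CLAIM (what is proved, stated in full; the proofs are below) =====
def Claim_equal_mfu : Prop := ∀ (pages : List Int) (capacity : Int), Dom_mfu pages capacity → Pre_mfu pages capacity → Spec_mfu pages capacity (mfu pages capacity)

-- ===== LEMMAS AND PROOFS =====

theorem tupLt_asymm {a b : Int × Int × Int} (h : tupLt a b = true) : tupLt b a = false := by
  obtain ⟨a1, a2, a3⟩ := a; obtain ⟨b1, b2, b3⟩ := b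
  simp [tupLt] at h ⊢; omega

theorem tupLt_false_trans {a b c : Int × Int × Int}
    (h1 : tupLt b a = false) (h2 : tupLt c b = false) : tupLt c a = false := by
  obtain ⟨a1, a2, a3⟩ := a; obtain ⟨b1, b2, b3⟩ := b; obtain ⟨c1, c2, c3⟩ := c
  simp [tupLt] at h1 h2 ⊢; omega

theorem mem_insortB {l : List (Int × Int × Int)} {e y : Int × Int × Int} :
    y ∈ insortB l e ↔ y = e ∨ y ∈ l := by
  induction l with
  | nil => simp [insortB]
  | cons x t ih =>
    by_cases h : tupLt x e = true
    · simp [insortB, h, ih]; tauto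
    · simp [insortB, h]

-- sortedness: each element is not tupLt-greater than any later one
theorem sorted_insortB {l : List (Int × Int × Int)} {e : Int × Int × Int}
    (h : l.Pairwise (fun a b => tupLt b a = false)) :
    (insortB l e).Pairwise (fun a b => tupLt b a = false) := by
  induction l with
  | nil => simp [insortB]
  | cons x t ih =>
    rcases List.pairwise_cons.mp h with ⟨hx, ht⟩
    by_cases hb : tupLt x e = true
    · simp only [insortB, hb, if_true]
      refine List.pairwise_cons.mpr ⟨?_, ih ht⟩
      intro y hy
      rcases mem_insortB.mp hy with rfl | hyt
      · exact tupLt_asymm hb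
      · exact hx y hyt
    · have hb' : tupLt x e = false := by simpa using hb
      simp only [insortB, hb', Bool.false_eq_true, if_false]
      refine List.pairwise_cons.mpr ⟨?_, h⟩
      intro y hy
      rcases List.mem_cons.mp hy with rfl | hyt
      · exact hb'
      · exact tupLt_false_trans hb' (hx y hyt)

-- popGo finds the FIRST valid candidate of the (reversed) list
theorem popGo_first (cache : PySem.Dict Int (Int × Int)) :
    ∀ (rl : List (Int × Int × Int)), (∃ x ∈ rl, validB cache x = true) →
      ∃ d e rest, rl = d ++ e :: rest ∧ (∀ x ∈ d, validB cache x = false) ∧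
        validB cache e = true ∧ popGo cache rl = some (rest, e.2.2) := by
  intro rl
  induction rl with
  | nil => rintro ⟨x, hx, _⟩; simp at hx
  | cons a t ih =>
    intro hex
    by_cases ha : validB cache a = true
    · exact ⟨[], a, t, by simp, by simp, ha, by simp [popGo, ha]⟩
    · have : ∃ x ∈ t, validB cache x = true := by
        rcases hex with ⟨x, hx, hv⟩
        rcases List.mem_cons.mp hx with rfl | hxt
        · exact absurd hv ha
        · exact ⟨x, hxt, hv⟩
      rcases ih this with ⟨d, e, rest, hrl, hd, he, hpop⟩
      refine ⟨a :: d, e, rest, by simp [hrl], ?_, he, ?_⟩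
      · intro x hx
        rcases List.mem_cons.mp hx with rfl | hxd
        · simpa using ha
        · exact hd x hxd
      · simpa [popGo, ha] using hpop

-- Python's max(xs, key) returns m when everything before m is strictly below and
-- everything after is at most key m (first extremal element)
def maxStep (key : Int → Int) (acc : Option Int) (x : Int) : Option Int :=
  match acc with
  | none => some x
  | some mm => if key mm < key x then some x else some mm

theorem max?_eq_foldl_maxStep (key : Int → Int) (xs : List Int) :
    PySem.List.max? xs key = List.foldl (maxStep key) none xs := by
  unfold PySem.List.max?
  apply PySem.List.foldl_congr_mem
  intro acc x _
  cases acc <;> rfl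

theorem max?_append_first (key : Int → Int) (l1 l2 : List Int) (m : Int)
    (h1 : ∀ y ∈ l1, key y < key m) (h2 : ∀ y ∈ l2, key y ≤ key m) :
    PySem.List.max? (l1 ++ m :: l2) key = some m := by
  have haux : ∀ (l : List Int), (∀ y ∈ l, key y ≤ key m) →
      List.foldl (maxStep key) (some m) l = some m := by
    intro l
    induction l with
    | nil => intro _; rfl
    | cons x t ih =>
      intro hall
      have hx : ¬ key m < key x := not_lt.mpr (hall x (by simp))
      simpa [maxStep, hx] using ih (fun y hy => hall y (by simp [hy]))
  rw [max?_eq_foldl_maxStep, List.foldl_append]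
  cases hc : List.foldl (maxStep key) none l1 with
  | none => simpa [maxStep] using haux l2 h2
  | some a =>
      have ha : a ∈ l1 := PySem.List.max?_mem (key := key)
        (by rw [max?_eq_foldl_maxStep]; exact hc)
      have hlt : key a < key m := h1 a ha
      simpa [maxStep, hlt] using haux l2 h2

theorem nodup_mid {l1 l2 : List Int} {a : Int} (h : (l1 ++ a :: l2).Nodup) :
    a ∉ l1 ∧ a ∉ l2 := by
  obtain ⟨h1, h2, h3⟩ := List.nodup_append.mp h
  exact ⟨fun hm => (h3 a hm a (by simp)) rfl, (List.nodup_cons.mp h2).1⟩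

theorem pv_mfu_loop (capacity : Int) (hcap : 0 < capacity) :
    ∀ (pages : List Int) (R : List (Int × Int × Int)) (faults seq : Int)
      (freqA : PySem.Dict Int Int) (cache : PySem.Dict Int (Int × Int))
      (entries : List (Int × Int × Int)),
      cache.items = R →
      (R.map (·.1)).Nodup →
      (∀ r ∈ R, freqA.getD r.1 0 = r.2.1) →
      R.Pairwise (fun a b => a.2.2 < b.2.2) →
      (∀ r ∈ R, r.2.2 < seq) →
      entries.Pairwise (fun a b => tupLt b a = false) →
      (∀ r ∈ R, (r.2.1, -r.2.2, r.1) ∈ entries) →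
      (pages.foldl (mfuStepA capacity) (R.map (·.1), faults, freqA)).2.1 =
      (pages.foldl (mfuStepB capacity) (cache, entries, faults, seq)).2.2.1 := by
  intro pages
  induction pages with
  | nil => intro R faults seq freqA cache entries _ _ _ _ _ _ _; rfl
  | cons p0 rest ih =>
    intro R faults seq freqA cache entries hitems hnd hfreq hseqinc hseqlt hsorted hcur
    have hkeys : cache.keys = R.map (·.1) := by
      simp [PySem.Dict.keys, hitems]
    have hndk : cache.keys.Nodup := by rw [hkeys]; exact hnd
    have hget_r : ∀ r ∈ R, cache.get? r.1 = some (r.2.1, r.2.2) := by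
      intro r hr
      exact PySem.Dict.get?_of_mem_items cache (by rw [hitems]; simpa using hr) hndk
    simp only [List.foldl_cons]
    by_cases hmem : p0 ∈ R.map (·.1)
    · -- HIT: page resident; A bumps freq[page], B bumps cache[page] and pushes a candidate
      obtain ⟨r0, hr0R, hr01⟩ := List.mem_map.mp hmem
      obtain ⟨p0', f0, s0⟩ := r0
      cases hr01
      have hf0 : freqA.getD p0' 0 = f0 := hfreq _ hr0R
      have hget : cache.get? p0' = some (f0, s0) := hget_r _ hr0R
      have hAstep : mfuStepA capacity (R.map (·.1), faults, freqA) p0'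
          = (R.map (·.1), faults, freqA.insert p0' (f0 + 1)) := by
        simp only [mfuStepA]
        rw [if_neg (by simp [hmem]), hf0]
      have hBstep : mfuStepB capacity (cache, entries, faults, seq) p0'
          = (cache.insert p0' (f0 + 1, s0), insortB entries (f0 + 1, -s0, p0'), faults, seq) := by
        simp [mfuStepB, hget]
      rw [hAstep, hBstep]
      obtain ⟨R1, R2, hRdec⟩ := List.append_of_mem hr0R
      subst hRdec
      have hndm := hnd
      rw [List.map_append, List.map_cons] at hndm
      obtain ⟨hp0R1, hp0R2⟩ := nodup_mid hndm
      have hne1 : ∀ q ∈ R1, q.1 ≠ p0' := fun q hq h => hp0R1 (List.mem_map.mpr ⟨q, hq, h⟩)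
      have hne2 : ∀ q ∈ R2, q.1 ≠ p0' := fun q hq h => hp0R2 (List.mem_map.mpr ⟨q, hq, h⟩)
      have hmm : (R1 ++ (p0', f0, s0) :: R2).map (·.1)
          = (R1 ++ (p0', f0 + 1, s0) :: R2).map (·.1) := by simp
      rw [hmm]
      apply ih (R1 ++ (p0', f0 + 1, s0) :: R2) faults seq
      · -- items: overwrite keeps position
        have hcont : cache.contains p0' = true :=
          (PySem.Dict.contains_iff_mem_keys cache p0').mpr (by rw [hkeys]; exact hmem)
        rw [PySem.Dict.items_insert_of_contains _ _ hcont, hitems,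
          List.map_append, List.map_cons]
        congr 1
        · refine (List.map_congr_left fun q hq => ?_).trans (List.map_id R1)
          simp [hne1 q hq]
        · congr 1
          · simp
          · refine (List.map_congr_left fun q hq => ?_).trans (List.map_id R2)
            simp [hne2 q hq]
      · simpa using hnd
      · -- frequencies
        intro r hr
        simp only [List.mem_append, List.mem_cons] at hr
        rcases hr with hr | rfl | hr
        · rw [PySem.Dict.getD_insert]
          simp only [hne1 r hr, if_false]
          exact hfreq r (by simp [hr])
        · simp [PySem.Dict.getD_insert_self]
        · rw [PySem.Dict.getD_insert]
          simp only [hne2 r hr, if_false]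
          exact hfreq r (by simp [hr])
      · -- sequence numbers still increasing
        apply List.pairwise_map (f := fun r : Int × Int × Int => r.2.2) (R := (· < ·)) |>.mp
        have h1 : ((R1 ++ (p0', f0 + 1, s0) :: R2).map (·.2.2))
            = ((R1 ++ (p0', f0, s0) :: R2).map (·.2.2)) := by simp
        rw [h1]
        exact List.pairwise_map.mpr hseqinc
      · -- sequence bound
        intro r hr
        simp only [List.mem_append, List.mem_cons] at hr
        rcases hr with hr | rfl | hr
        · exact hseqlt r (by simp [hr])
        · exact hseqlt (p0', f0, s0) (by simp)
        · exact hseqlt r (by simp [hr])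
      · exact sorted_insortB hsorted
      · -- current candidates present
        intro r hr
        simp only [List.mem_append, List.mem_cons] at hr
        rcases hr with hr | rfl | hr
        · exact mem_insortB.mpr (Or.inr (hcur r (by simp [hr])))
        · exact mem_insortB.mpr (Or.inl rfl)
        · exact mem_insortB.mpr (Or.inr (hcur r (by simp [hr])))
    · -- MISS
      have hnefresh : ∀ q ∈ R, q.1 ≠ p0 := fun q hq h => hmem (List.mem_map.mpr ⟨q, hq, h⟩)
      have hget0 : cache.get? p0 = none := by
        rw [PySem.Dict.get?_eq_none_iff_not_mem_keys, hkeys]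
        exact hmem
      have hcont0 : cache.contains p0 = false := by
        rw [Bool.eq_false_iff]
        intro h
        exact hmem (hkeys ▸ (PySem.Dict.contains_iff_mem_keys cache p0).mp h)
      have hsz : (cache.size : Int) = (R.length : Int) := by
        simp [PySem.Dict.size, hitems]
      by_cases hlen : ((R.map (·.1)).length : Int) < capacity
      · -- room: both append the page with frequency 1
        have hAstep : mfuStepA capacity (R.map (·.1), faults, freqA) p0
            = (R.map (·.1) ++ [p0], faults + 1, freqA.insert p0 1) := by
          simp only [mfuStepA]
          rw [if_pos (by simp [hmem]), if_pos hlen]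
        have hBstep : mfuStepB capacity (cache, entries, faults, seq) p0
            = (cache.insert p0 (1, seq), insortB entries (1, -seq, p0), faults + 1, seq + 1) := by
          have h1 : ¬ capacity ≤ (cache.size : Int) := by
            rw [hsz]; simpa using hlen
          simp [mfuStepB, hget0, h1]
        rw [hAstep, hBstep]
        have hmm : R.map (·.1) ++ [p0]
            = ((R ++ [(p0, 1, seq)] : List (Int × Int × Int)).map (·.1)) := by simp
        rw [hmm]
        apply ih (R ++ [(p0, 1, seq)]) (faults + 1) (seq + 1)
        · rw [PySem.Dict.items_insert_of_not_contains _ _ hcont0, hitems]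
        · simp only [List.map_append, List.map_cons, List.map_nil]
          refine List.nodup_append.mpr ⟨hnd, List.nodup_singleton _, ?_⟩
          intro a ha b hb
          simp only [List.mem_singleton] at hb
          subst hb
          obtain ⟨q, hq, rfl⟩ := List.mem_map.mp ha
          exact hnefresh q hq
        · intro r hr
          simp only [List.mem_append, List.mem_cons, List.not_mem_nil, or_false] at hr
          rcases hr with hr | rfl
          · rw [PySem.Dict.getD_insert]
            simp only [hnefresh r hr, if_false]
            exact hfreq r hr
          · simp [PySem.Dict.getD_insert_self]
        · refine List.pairwise_append.mpr ⟨hseqinc, List.pairwise_singleton _ _, ?_⟩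
          intro a ha b hb
          simp only [List.mem_singleton] at hb
          subst hb
          exact hseqlt a ha
        · intro r hr
          simp only [List.mem_append, List.mem_cons, List.not_mem_nil, or_false] at hr
          rcases hr with hr | rfl
          · have := hseqlt r hr; omega
          · simp
        · exact sorted_insortB hsorted
        · intro r hr
          simp only [List.mem_append, List.mem_cons, List.not_mem_nil, or_false] at hr
          rcases hr with hr | rfl
          · exact mem_insortB.mpr (Or.inr (hcur r hr))
          · exact mem_insortB.mpr (Or.inl rfl)
      · -- full: A scans for the max-frequency page, B pops stale candidates lazily
        have hcapR : capacity ≤ (R.length : Int) := by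
          simpa using not_lt.mp hlen
        have hRne : R ≠ [] := by
          intro h; subst h; simp at hcapR; omega
        obtain ⟨r1, hr1⟩ := List.exists_mem_of_ne_nil R hRne
        have hcurval : ∀ r ∈ R, validB cache (r.2.1, -r.2.2, r.1) = true := by
          intro r hr
          simp [validB, hget_r r hr]
        have hex : ∃ x ∈ entries.reverse, validB cache x = true :=
          ⟨(r1.2.1, -r1.2.2, r1.1), List.mem_reverse.mpr (hcur r1 hr1), hcurval r1 hr1⟩
        obtain ⟨d, e, restl, hsplit, hdinv, hev, hpop⟩ := popGo_first cache entries.reverse hex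
        have hent : entries = restl.reverse ++ e :: d.reverse := by
          have h := congrArg List.reverse hsplit
          simpa using h
        obtain ⟨fe, nse, pe⟩ := e
        have hve : cache.get? pe = some (fe, -nse) := by
          simpa [validB] using hev
        have hmemR : (pe, fe, -nse) ∈ R := by
          have h := PySem.Dict.mem_items_of_get?_eq_some cache hve
          rwa [hitems] at h
        obtain ⟨R1, R2, hRdec⟩ := List.append_of_mem hmemR
        subst hRdec
        have hndm := hnd
        rw [List.map_append, List.map_cons] at hndm
        obtain ⟨hpeR1, hpeR2⟩ := nodup_mid hndm
        have hne1 : ∀ q ∈ R1, q.1 ≠ pe := fun q hq h => hpeR1 (List.mem_map.mpr ⟨q, hq, h⟩)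
        have hne2 : ∀ q ∈ R2, q.1 ≠ pe := fun q hq h => hpeR2 (List.mem_map.mpr ⟨q, hq, h⟩)
        have hseqs := List.pairwise_append.mp hseqinc
        have hseqR1 : ∀ r ∈ R1, r.2.2 < -nse := fun r hr =>
          hseqs.2.2 r hr (pe, fe, -nse) (by simp)
        have hseqR2 : ∀ r ∈ R2, -nse < r.2.2 := fun r hr =>
          (List.pairwise_cons.mp hseqs.2.1).1 r hr
        -- every other resident page's candidate survives the pops
        have hcrest : ∀ r ∈ R1 ++ R2, (r.2.1, -r.2.2, r.1) ∈ restl.reverse := by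
          intro r hr
          have hrR : r ∈ R1 ++ (pe, fe, -nse) :: R2 := by
            simp only [List.mem_append, List.mem_cons] at hr ⊢; tauto
          have hne : r.1 ≠ pe := by
            simp only [List.mem_append] at hr
            rcases hr with hr | hr
            · exact hne1 r hr
            · exact hne2 r hr
          have hcr := hcur r hrR
          rw [hent] at hcr
          simp only [List.mem_append, List.mem_cons] at hcr
          rcases hcr with hcr | hcr | hcr
          · exact hcr
          · exact absurd (congrArg (fun x : Int × Int × Int => x.2.2) hcr) (by simpa using hne)
          · exfalso
            have hval := hcurval r hrR
            have hinv := hdinv _ (List.mem_reverse.mp hcr)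
            rw [hval] at hinv
            cases hinv
        -- the found candidate dominates every other resident candidate
        have hdomlt : ∀ r ∈ R1 ++ R2, tupLt (fe, nse, pe) (r.2.1, -r.2.2, r.1) = false := by
          intro r hr
          have hc := hcrest r hr
          have hs := hsorted
          rw [hent] at hs
          exact (List.pairwise_append.mp hs).2.2 _ hc (fe, nse, pe) (by simp)
        have hfe : freqA.getD pe 0 = fe := hfreq (pe, fe, -nse) (by simp)
        have hmax : PySem.List.max? ((R1 ++ (pe, fe, -nse) :: R2).map (·.1))
            (fun q => freqA.getD q 0) = some pe := by
          rw [List.map_append, List.map_cons]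
          apply max?_append_first
          · intro y hy
            obtain ⟨r, hr, rfl⟩ := List.mem_map.mp hy
            have h1 := hdomlt r (by simp [hr])
            have h2 := hseqR1 r hr
            have hfr : freqA.getD r.1 0 = r.2.1 := hfreq r (by simp [hr])
            rw [hfr, hfe]
            simp [tupLt] at h1
            omega
          · intro y hy
            obtain ⟨r, hr, rfl⟩ := List.mem_map.mp hy
            have h1 := hdomlt r (by simp [hr])
            have hfr : freqA.getD r.1 0 = r.2.1 := hfreq r (by simp [hr])
            rw [hfr, hfe]
            simp [tupLt] at h1
            omega
        have hAstep : mfuStepA capacity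
            ((R1 ++ (pe, fe, -nse) :: R2).map (·.1), faults, freqA) p0
            = (R1.map (·.1) ++ R2.map (·.1) ++ [p0], faults + 1, freqA.insert p0 1) := by
          have hrem : PySem.List.remove? (R1.map (·.1) ++ pe :: R2.map (·.1)) pe
              = some (R1.map (·.1) ++ R2.map (·.1)) := by
            rw [PySem.List.remove?_eq_some_erase _ _ (by simp),
              List.erase_append_right _ hpeR1, List.erase_cons_head]
          simp only [mfuStepA]
          rw [if_pos hmem, if_neg hlen, hmax]
          simp [hrem]
        have hszc : capacity ≤ (cache.size : Int) := by
          rw [hsz]; exact hcapR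
        have hBstep : mfuStepB capacity (cache, entries, faults, seq) p0
            = ((cache.erase pe).insert p0 (1, seq),
               insortB restl.reverse (1, -seq, p0), faults + 1, seq + 1) := by
          simp [mfuStepB, hget0, hszc, hpop]
        rw [hAstep, hBstep]
        have hmm : R1.map (·.1) ++ R2.map (·.1) ++ [p0]
            = (((R1 ++ R2) ++ [(p0, 1, seq)] : List (Int × Int × Int)).map (·.1)) := by simp
        rw [hmm]
        have heraseItems : (cache.erase pe).items = R1 ++ R2 := by
          show cache.items.filter _ = _
          rw [hitems, List.filter_append, List.filter_cons]
          have e1 : R1.filter (fun q => !(q.1 == pe)) = R1 :=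
            List.filter_eq_self.mpr (fun q hq => by simpa using hne1 q hq)
          have e2 : R2.filter (fun q => !(q.1 == pe)) = R2 :=
            List.filter_eq_self.mpr (fun q hq => by simpa using hne2 q hq)
          simp [e1, e2]
        apply ih ((R1 ++ R2) ++ [(p0, 1, seq)]) (faults + 1) (seq + 1)
        · -- items
          have hcont2 : (cache.erase pe).contains p0 = false := by
            rw [Bool.eq_false_iff]
            intro h
            have hk := (PySem.Dict.contains_iff_mem_keys _ p0).mp h
            simp only [PySem.Dict.keys, heraseItems] at hk
            obtain ⟨q, hq, hq1⟩ := List.mem_map.mp hk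
            simp only [List.mem_append] at hq
            rcases hq with hq | hq
            · exact hnefresh q (by simp [hq]) hq1
            · exact hnefresh q (by simp [hq]) hq1
          rw [PySem.Dict.items_insert_of_not_contains _ _ hcont2, heraseItems]
        · -- nodup
          simp only [List.map_append, List.map_cons, List.map_nil]
          have hsub : List.Sublist (R1.map (·.1) ++ R2.map (·.1))
              (R1.map (·.1) ++ pe :: R2.map (·.1)) :=
            List.Sublist.append_left (List.sublist_cons_self _ _) _
          refine List.nodup_append.mpr ⟨hsub.nodup hndm, List.nodup_singleton _, ?_⟩
          intro a ha b hb
          simp only [List.mem_singleton] at hb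
          subst hb
          simp only [List.mem_append] at ha
          rcases ha with ha | ha <;>
            · obtain ⟨q, hq, rfl⟩ := List.mem_map.mp ha
              exact hnefresh q (by simp [hq])
        · -- frequencies
          intro r hr
          simp only [List.mem_append, List.mem_cons, List.not_mem_nil, or_false] at hr
          rcases hr with (hr | hr) | rfl
          · rw [PySem.Dict.getD_insert]
            simp only [hnefresh r (by simp [hr]), if_false]
            exact hfreq r (by simp [hr])
          · rw [PySem.Dict.getD_insert]
            simp only [hnefresh r (by simp [hr]), if_false]
            exact hfreq r (by simp [hr])
          · simp [PySem.Dict.getD_insert_self]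
        · -- sequence numbers increasing
          have hsubR : List.Sublist (R1 ++ R2) (R1 ++ (pe, fe, -nse) :: R2) :=
            List.Sublist.append_left (List.sublist_cons_self _ _) _
          refine List.pairwise_append.mpr ⟨List.Pairwise.sublist hsubR hseqinc, List.pairwise_singleton _ _, ?_⟩
          intro a ha b hb
          simp only [List.mem_singleton] at hb
          subst hb
          exact hseqlt a (by simp only [List.mem_append, List.mem_cons] at ha ⊢; tauto)
        · -- sequence bound
          intro r hr
          simp only [List.mem_append, List.mem_cons, List.not_mem_nil, or_false] at hr
          rcases hr with (hr | hr) | rfl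
          · have := hseqlt r (by simp [hr]); omega
          · have := hseqlt r (by simp [hr]); omega
          · simp
        · -- surviving prefix is still sorted
          have hs := hsorted
          rw [hent] at hs
          exact sorted_insortB (List.pairwise_append.mp hs).1
        · -- current candidates present
          intro r hr
          simp only [List.mem_append, List.mem_cons, List.not_mem_nil, or_false] at hr
          rcases hr with (hr | hr) | rfl
          · exact mem_insortB.mpr (Or.inr (hcrest r (by simp [hr])))
          · exact mem_insortB.mpr (Or.inr (hcrest r (by simp [hr])))
          · exact mem_insortB.mpr (Or.inl rfl)

-- ===== VERDICT (by name: the statement is the Claim_ definition above) =====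
theorem mfu_spec : Claim_equal_mfu := by
  intro pages capacity _ hpre
  unfold Spec_mfu mfu mfu_alt
  rcases hpre with hcap | hnil
  · exact pv_mfu_loop capacity hcap pages [] 0 0 PySem.Dict.empty PySem.Dict.empty [] rfl
      List.nodup_nil (by simp) (by simp) (by simp) (by simp) (by simp)
  · subst hnil; rfl
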